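-- pv_equiv track=rewrite | github.com/Ayanleaideed/2025-leetcode-daily-challenge | solutions/20241228_substring_with_different_klength.py | find_unique_substrings
-- ===== SOURCE A (Python) =====
-- from collections import deque
--
-- def find_unique_substrings(s:str, k:int) -> list[str]:
--     """
--     This function generates a list of substrings of length 'k' from the given string 's'.
--     Here, a substring is unique if all of its characters are distinct.
--     Args:
--     s: input string consisting of only ASCII characters.
--     k: a non-negative integer less than or equal to the length of the string, length of the substrings to be created.
--     Returns:
--     A list of all maximum length unique k-length substrings. An empty list, if there is no possible unique k-length substring.
--     """
--     substring = deque()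
--     result = []
--     for i in range(len(s)):
--         while s[i] in substring:
--             substring.popleft()
--         substring.append(s[i])
--         if len(substring) == k:
--             result.append("".join(substring))
--             substring.popleft()
--     return result
-- ===== SOURCE B (Python) =====
-- def find_unique_substrings(s: str, k: int) -> list[str]:
--     last = {}          # last index at which each character was seen
--     l = 0              # left edge of the current window
--     result = []
--     for i, c in enumerate(s):
--         p = last.get(c, -1)
--         if p + 1 > l:
--             l = p + 1
--         last[c] = i
--         if i - l + 1 == k:
--             result.append(s[l:i + 1])
--             l += 1
--     return result
-- ===== Notes on version B (the rewrite author's own statement) =====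
-- stated objective: faster
-- what changed: Replaces A's deque window (inner membership scan plus element-by-element poplefts per character) with a last-occurrence dictionary and a left index advanced in O(1), emitting each window by string slicing: one pass with no inner loop.
import Mathlib
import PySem

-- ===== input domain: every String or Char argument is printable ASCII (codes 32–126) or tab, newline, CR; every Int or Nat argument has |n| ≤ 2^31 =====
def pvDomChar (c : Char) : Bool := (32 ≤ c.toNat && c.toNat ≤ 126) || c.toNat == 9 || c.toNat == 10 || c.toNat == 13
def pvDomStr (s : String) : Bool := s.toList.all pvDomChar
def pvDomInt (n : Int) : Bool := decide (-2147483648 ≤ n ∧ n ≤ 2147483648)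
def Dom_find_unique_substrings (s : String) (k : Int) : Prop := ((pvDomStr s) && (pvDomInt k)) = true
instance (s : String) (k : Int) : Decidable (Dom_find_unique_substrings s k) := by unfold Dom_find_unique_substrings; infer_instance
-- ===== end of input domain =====

-- B replaces A's deque window (with its O(k) membership scan and element-by-element poplefts)
-- by a last-occurrence dictionary and a left index: one pass, no inner loop; a timing run
-- decides whether that is measurably faster. Equivalence is proved for all inputs (A is total).

-- ===== PORT A =====
-- 'while s[i] in substring: substring.popleft()' — checks membership in the current deque, pops the left element, re-checks
def pvPopWhile (c : Char) : List Char → List Char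
  | [] => []
  | x :: xs => if c ∈ x :: xs then pvPopWhile c xs else x :: xs

-- the body of A's 'for i in range(len(s))' loop; state = (substring deque as a char list, result)
-- '"".join(substring)' over a deque of single characters is String.ofList of the char list (exact)
def pvAStep (k : Int) (st : List Char × List String) (c : Char) : List Char × List String :=
  let w := pvPopWhile c st.1
  let w' := w ++ [c]
  if (w'.length : Int) = k then (w'.drop 1, st.2 ++ [String.ofList w'])
  else (w', st.2)

def find_unique_substrings (s : String) (k : Int) : List String :=
  (s.toList.foldl (pvAStep k) ([], [])).2

-- ===== PORT B =====
-- the body of B's 'for i, c in enumerate(s)' loop; state = (last-occurrence dict, left index l, result)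
def pvBStep (s : String) (k : Int) (st : PySem.Dict Char Int × Int × List String)
    (ic : Int × Char) : PySem.Dict Char Int × Int × List String :=
  let p := st.1.getD ic.2 (-1)
  let l := if p + 1 > st.2.1 then p + 1 else st.2.1
  let last := st.1.insert ic.2 ic.1
  if ic.1 - l + 1 = k then
    (last, l + 1, st.2.2 ++ [PySem.Str.slice s (some l) (some (ic.1 + 1))])
  else (last, l, st.2.2)

def find_unique_substrings_alt (s : String) (k : Int) : List String :=
  ((PySem.List.enumerate s.toList 0).foldl (pvBStep s k) (PySem.Dict.empty, 0, [])).2.2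

-- ===== PRECONDITION & SPEC =====
def Spec_find_unique_substrings (s : String) (k : Int) (out : List String) : Prop := out = find_unique_substrings_alt s k
instance (s : String) (k : Int) (out : List String) : Decidable (Spec_find_unique_substrings s k out) := by unfold Spec_find_unique_substrings; infer_instance

-- ===== CLAIM (what is proved, stated in full; the proofs are below) =====
def Claim_equal_find_unique_substrings : Prop := ∀ (s : String) (k : Int), Dom_find_unique_substrings s k → Spec_find_unique_substrings s k (find_unique_substrings s k)

-- ===== LEMMAS AND PROOFS =====

-- B's dict invariant: 'last' maps each char of the processed prefix to its last index there
def pvInvLast (pre : List Char) (last : PySem.Dict Char Int) : Prop :=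
  ∀ c : Char, match last.get? c with
  | some p => ∃ pn : Nat, p = (pn : Int) ∧ pn < pre.length ∧ pre[pn]? = some c ∧ c ∉ pre.drop (pn + 1)
  | none => c ∉ pre

theorem pvPopWhile_of_not_mem (c : Char) (w : List Char) (h : c ∉ w) : pvPopWhile c w = w := by
  cases w with
  | nil => rfl
  | cons x xs => simp [pvPopWhile, h]

theorem pvPopWhile_append (c : Char) (u v : List Char) (h : c ∉ v) :
    pvPopWhile c (u ++ c :: v) = v := by
  induction u with
  | nil => simp [pvPopWhile, pvPopWhile_of_not_mem c v h]
  | cons x u ih => simpa [pvPopWhile] using ih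

theorem pvInvLast_step (pre : List Char) (c : Char) (last : PySem.Dict Char Int)
    (hinv : pvInvLast pre last) :
    pvInvLast (pre ++ [c]) (last.insert c (pre.length : Int)) := by
  intro d
  by_cases hdc : d = c
  · subst hdc
    rw [PySem.Dict.get?_insert_self]
    exact ⟨pre.length, rfl, by simp, by simp, by simp⟩
  · rw [PySem.Dict.get?_insert_of_ne last _ hdc]
    have h := hinv d
    cases hg : last.get? d with
    | none =>
      rw [hg] at h
      simp [h, hdc]
    | some p =>
      rw [hg] at h
      obtain ⟨pn, hp, hlt, hat, hnm⟩ := h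
      refine ⟨pn, hp, by simp only [List.length_append, List.length_cons, List.length_nil]; omega, ?_, ?_⟩
      · rw [List.getElem?_append_left hlt]; exact hat
      · rw [List.drop_append_of_le_length (by omega)]
        simp [hnm, hdc]

-- the slice B emits is the window A joins
theorem pvSlice_eq (s : String) (pre t : List Char) (c : Char) (l : Nat)
    (hcs : s.toList = pre ++ c :: t) (hl : l ≤ pre.length) :
    PySem.Str.slice s (some (l : Int)) (some ((pre.length : Int) + 1))
      = String.ofList (pre.drop l ++ [c]) := by
  have h1 : ((pre.length : Int) + 1) = ((pre.length + 1 : Nat) : Int) := by push_cast; ring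
  simp only [PySem.Str.slice, PySem.Chars.slice_eq_listSlice, hcs, h1, PySem.List.slice_natCast]
  congr 1
  rw [List.drop_append_of_le_length hl]
  have h2 : pre.length + 1 - l = (pre.drop l).length + 1 := by
    rw [List.length_drop]; omega
  rw [h2, List.take_append]
  simp

theorem pvMain (s : String) (k : Int) (t pre : List Char) (hcs : s.toList = pre ++ t)
    (l : Nat) (hl : l ≤ pre.length) (last : PySem.Dict Char Int)
    (hinv : pvInvLast pre last) (res : List String) :
    (t.foldl (pvAStep k) (pre.drop l, res)).2
      = ((PySem.List.enumerate t (pre.length : Int)).foldl (pvBStep s k) (last, (l : Int), res)).2.2 := by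
  induction t generalizing pre l last res with
  | nil => simp [PySem.List.enumerate_nil]
  | cons c t ih =>
    rw [PySem.List.enumerate_cons]
    -- identify the new left edge l'' on both sides
    have key : ∃ l'' : Nat, l'' ≤ pre.length ∧ pvPopWhile c (pre.drop l) = pre.drop l'' ∧
        (if last.getD c (-1) + 1 > (l : Int) then last.getD c (-1) + 1 else (l : Int)) = ((l'' : Nat) : Int) := by
      have h := hinv c
      cases hg : last.get? c with
      | none =>
        rw [hg] at h
        refine ⟨l, hl, pvPopWhile_of_not_mem c _ (fun hm => h (List.mem_of_mem_drop hm)), ?_⟩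
        rw [PySem.Dict.getD_eq_get?_getD, hg]
        simp only [Option.getD_none]
        rw [if_neg (by omega)]
      | some p =>
        rw [hg] at h
        obtain ⟨pn, hp, hlt, hat, hnm⟩ := h
        by_cases hpl : pn + 1 ≤ l
        · refine ⟨l, hl, ?_, ?_⟩
          · refine pvPopWhile_of_not_mem c _ (fun hm => hnm ?_)
            have hd : pre.drop l = (pre.drop (pn + 1)).drop (l - (pn + 1)) := by
              rw [List.drop_drop]; congr 1; omega
            rw [hd] at hm
            exact List.mem_of_mem_drop hm
          · rw [PySem.Dict.getD_eq_get?_getD, hg, hp]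
            simp only [Option.getD_some]
            rw [if_neg (by omega)]
        · refine ⟨pn + 1, by omega, ?_, ?_⟩
          · have hsplit : pre.drop l = (pre.drop l).take (pn - l) ++ c :: pre.drop (pn + 1) := by
              have h1 : (pre.drop l).drop (pn - l) = pre.drop pn := by
                rw [List.drop_drop]; congr 1; omega
              have h2 : pre.drop pn = c :: pre.drop (pn + 1) := by
                rw [List.drop_eq_getElem_cons hlt]
                have hc : pre[pn] = c := by
                  rw [List.getElem?_eq_getElem hlt] at hat
                  exact Option.some_inj.mp hat
                rw [hc]
              conv_lhs => rw [← List.take_append_drop (pn - l) (pre.drop l)]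
              rw [h1, h2]
            rw [hsplit]
            exact pvPopWhile_append c _ _ hnm
          · rw [PySem.Dict.getD_eq_get?_getD, hg, hp]
            simp only [Option.getD_some]
            rw [if_pos (by omega)]
            push_cast; ring
    obtain ⟨l'', hl'', hpop, hifb⟩ := key
    have hwin : pre.drop l'' ++ [c] = (pre ++ [c]).drop l'' := by
      rw [List.drop_append_of_le_length hl'']
    have hcs' : s.toList = (pre ++ [c]) ++ t := by simpa using hcs
    have hlen : ((pre.drop l'' ++ [c]).length : Int) = (pre.length : Int) - (l'' : Int) + 1 := by
      simp only [List.length_append, List.length_drop, List.length_cons, List.length_nil]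
      omega
    have hlen1 : ((pre.length : Int) + 1) = (((pre ++ [c]).length : Nat) : Int) := by
      simp only [List.length_append, List.length_cons, List.length_nil]; push_cast; ring
    -- unfold one step on each side
    simp only [List.foldl_cons, pvAStep, pvBStep, hpop, hifb]
    rw [hlen]
    split_ifs with hcond
    · rw [pvSlice_eq s pre t c l'' hcs hl'', hwin]
      have hdrop1 : ((pre ++ [c]).drop l'').drop 1 = (pre ++ [c]).drop (l'' + 1) := by
        rw [List.drop_drop]
      rw [hdrop1]
      have hc1 : ((l'' : Int) + 1) = ((l'' + 1 : Nat) : Int) := by push_cast; ring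
      rw [hc1, hlen1]
      exact ih (pre ++ [c]) hcs' (l'' + 1)
        (by simp only [List.length_append, List.length_cons, List.length_nil]; omega)
        (last.insert c (pre.length : Int)) (pvInvLast_step pre c last hinv) _
    · rw [hwin, hlen1]
      exact ih (pre ++ [c]) hcs' l''
        (by simp only [List.length_append, List.length_cons, List.length_nil]; omega)
        (last.insert c (pre.length : Int)) (pvInvLast_step pre c last hinv) _

-- ===== VERDICT (by name: the statement is the Claim_ definition above) =====
theorem find_unique_substrings_spec : Claim_equal_find_unique_substrings := by
  intro s k _
  unfold Spec_find_unique_substrings find_unique_substrings find_unique_substrings_alt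
  have h := pvMain s k s.toList [] (by simp) 0 (by simp) PySem.Dict.empty
    (by unfold pvInvLast; intro c; simp [PySem.Dict.get?_empty]) []
  simpa using h
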